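-- pv_equiv track=rewrite | github.com/kyledprycejones/homelab | scripts/executor/stage1_backlog_sync.py | parse_existing_stage
-- ===== SOURCE A (Python) =====
-- from typing import Dict, List, Optional
--
-- def parse_existing_stage(lines: List[str], header: str) -> List[str]:
--     start = None
--     for idx, line in enumerate(lines):
--         if line.strip().lower().startswith(header.lower()):
--             start = idx
--             break
--     if start is None:
--         return []
--     end = len(lines)
--     for idx in range(start + 1, len(lines)):
--         if lines[idx].startswith("## "):
--             end = idx
--             break
--     return lines[start:end]
-- ===== SOURCE B (Python) =====
-- def parse_existing_stage(lines, header):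
--     target = header.lower()
--     out = []
--     started = False
--     for line in lines:
--         if not started:
--             if line.strip().lower().startswith(target):
--                 started = True
--                 out.append(line)
--         else:
--             if line.startswith("## "):
--                 break
--             out.append(line)
--     return out
-- ===== Notes on version B (the rewrite author's own statement) =====
-- stated objective: simpler
-- what changed: Replaced the two sequential index scans plus a slice by one linear pass with a started flag and an accumulator, computing header.lower() once instead of once per line.
import Mathlib
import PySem

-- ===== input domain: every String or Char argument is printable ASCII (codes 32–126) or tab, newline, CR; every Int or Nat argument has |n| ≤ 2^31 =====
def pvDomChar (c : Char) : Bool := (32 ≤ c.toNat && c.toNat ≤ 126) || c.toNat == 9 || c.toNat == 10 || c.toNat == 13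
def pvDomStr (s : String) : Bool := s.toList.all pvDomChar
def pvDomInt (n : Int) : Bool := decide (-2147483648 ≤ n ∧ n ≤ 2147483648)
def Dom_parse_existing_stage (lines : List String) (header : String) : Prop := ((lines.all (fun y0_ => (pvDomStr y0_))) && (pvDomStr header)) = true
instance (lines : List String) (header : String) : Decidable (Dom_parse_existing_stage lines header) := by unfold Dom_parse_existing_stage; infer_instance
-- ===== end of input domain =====

-- B replaces A's two sequential index scans plus a slice by one linear pass with a
-- started flag and an accumulator (objective: simpler).

-- ===== PORT A =====
-- first loop of A: index of the first line matching the header, else none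
def aFindStart (lines : List String) (header : String) (idx : Nat) : Option Nat :=
  match lines with
  | [] => none
  | l :: rest =>
    if PySem.Str.startswith (PySem.Str.lower (PySem.Str.strip l)) (PySem.Str.lower header)
    then some idx else aFindStart rest header (idx + 1)

-- second loop of A: first index ≥ idx whose line starts with "## ", else len(lines)
def aFindEnd (lines : List String) (idx : Nat) : Nat :=
  if h : idx < lines.length then
    if PySem.Str.startswith lines[idx] "## " then idx
    else aFindEnd lines (idx + 1)
  else lines.length
termination_by lines.length - idx

def parse_existing_stage (lines : List String) (header : String) : List String :=
  match aFindStart lines header 0 with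
  | none => []
  | some s =>
      PySem.List.slice lines (some (s : Int)) (some ((aFindEnd lines (s + 1) : Nat) : Int))

-- ===== PORT B =====
-- single pass with a started flag; accumulation is by cons (Python's append)
def bLoop (target : String) (started : Bool) : List String → List String
  | [] => []
  | l :: rest =>
    if started then
      if PySem.Str.startswith l "## " then []
      else l :: bLoop target true rest
    else if PySem.Str.startswith (PySem.Str.lower (PySem.Str.strip l)) target then
      l :: bLoop target true rest
    else bLoop target false rest

def parse_existing_stage_alt (lines : List String) (header : String) : List String :=
  bLoop (PySem.Str.lower header) false lines

-- ===== PRECONDITION & SPEC =====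
def Spec_parse_existing_stage (lines : List String) (header : String) (out : List String) : Prop := out = parse_existing_stage_alt lines header
instance (lines : List String) (header : String) (out : List String) : Decidable (Spec_parse_existing_stage lines header out) := by unfold Spec_parse_existing_stage; infer_instance

-- ===== CLAIM (what is proved, stated in full; the proofs are below) =====
def Claim_equal_parse_existing_stage : Prop := ∀ (lines : List String) (header : String), Dom_parse_existing_stage lines header → Spec_parse_existing_stage lines header (parse_existing_stage lines header)

-- ===== LEMMAS AND PROOFS =====

theorem aFindStart_shift (xs : List String) (header : String) :
    ∀ idx, aFindStart xs header (idx + 1) = (aFindStart xs header idx).map (· + 1) := by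
  induction xs with
  | nil => intro idx; rfl
  | cons l rest ih =>
    intro idx
    simp only [aFindStart]
    split
    · rfl
    · exact ih (idx + 1)

theorem aFindEnd_cons (x : String) (xs : List String) (idx : Nat) :
    aFindEnd (x :: xs) (idx + 1) = aFindEnd xs idx + 1 := by
  fun_induction aFindEnd xs idx with
  | case1 idx h hsw =>
    rw [aFindEnd]
    simp only [List.length_cons]
    rw [dif_pos (by omega)]
    simp only [List.getElem_cons_succ]
    rw [if_pos hsw]
  | case2 idx h hsw ih =>
    rw [aFindEnd]
    simp only [List.length_cons]
    rw [dif_pos (by omega)]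
    simp only [List.getElem_cons_succ]
    rw [if_neg hsw]
    exact ih
  | case3 idx h =>
    rw [aFindEnd]
    simp only [List.length_cons]
    rw [dif_neg (by omega)]

theorem bLoop_true_eq_take (target : String) (xs : List String) :
    bLoop target true xs = xs.take (aFindEnd xs 0) := by
  induction xs with
  | nil => rw [aFindEnd]; simp [bLoop]
  | cons r rs ih =>
    rw [aFindEnd]
    simp only [List.length_cons]
    rw [dif_pos (by omega)]
    simp only [List.getElem_cons_zero]
    rw [show bLoop target true (r :: rs)
          = if PySem.Str.startswith r "## " then [] else r :: bLoop target true rs from rfl]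
    by_cases hsw : PySem.Str.startswith r "## "
    · rw [if_pos hsw, if_pos hsw]
      simp
    · rw [if_neg hsw, if_neg hsw]
      rw [aFindEnd_cons r rs 0]
      simp [ih]

theorem ab_eq (lines : List String) (header : String) :
    parse_existing_stage lines header = parse_existing_stage_alt lines header := by
  induction lines with
  | nil => rfl
  | cons l rest ih =>
    unfold parse_existing_stage parse_existing_stage_alt at *
    have eB : bLoop (PySem.Str.lower header) false (l :: rest)
        = if PySem.Str.startswith (PySem.Str.lower (PySem.Str.strip l)) (PySem.Str.lower header)
          then l :: bLoop (PySem.Str.lower header) true rest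
          else bLoop (PySem.Str.lower header) false rest := rfl
    by_cases hm :
        PySem.Str.startswith (PySem.Str.lower (PySem.Str.strip l)) (PySem.Str.lower header)
    · -- header found at the head line
      simp only [aFindStart, if_pos hm]
      rw [aFindEnd_cons l rest 0, eB, if_pos hm, bLoop_true_eq_take]
      rw [PySem.List.slice_natCast]
      simp
    · -- head line does not match: both sides fall through to the tail
      simp only [aFindStart, if_neg hm]
      rw [aFindStart_shift rest header 0, eB, if_neg hm]
      cases hs : aFindStart rest header 0 with
      | none =>
        simp only [hs, Option.map_none] at ih ⊢
        exact ih
      | some s =>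
        simp only [hs, Option.map_some] at ih ⊢
        rw [aFindEnd_cons l rest (s + 1)]
        rw [PySem.List.slice_natCast] at ih ⊢
        simp only [List.drop_succ_cons]
        rw [← ih]
        congr 1
        omega

-- ===== VERDICT (by name: the statement is the Claim_ definition above) =====
theorem parse_existing_stage_spec : Claim_equal_parse_existing_stage := by
  intro lines header _
  unfold Spec_parse_existing_stage
  exact ab_eq lines header
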